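-- pv_equiv track=rewrite | github.com/AI-Advenced/AutoERP | autoerp/ui.py | _apply_notification_filters
-- ===== SOURCE A (Python) =====
-- from typing import Dict, List, Any, Optional, Tuple, Union, Callable
--
-- def _apply_notification_filters(notifications: List[Dict], status: str, priority: str, type_filter: str) -> List[Dict]:
--     """Apply filters to notifications."""
--     filtered = notifications
--
--     if status != "All":
--         filtered = [n for n in filtered if n["status"] == status]
--
--     if priority != "All":
--         filtered = [n for n in filtered if n["priority"] == priority]
--
--     if type_filter != "All":
--         filtered = [n for n in filtered if n["type"] == type_filter]
--
--     return filtered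
-- ===== SOURCE B (Python) =====
-- def _apply_notification_filters(notifications, status, priority, type_filter):
--     """Filter notifications against a data-driven list of active criteria,
--     consuming the input recursively."""
--     criteria = [(key, value)
--                 for key, value in (("status", status),
--                                    ("priority", priority),
--                                    ("type", type_filter))
--                 if value != "All"]
--
--     def keep(rest):
--         if not rest:
--             return []
--         head = rest[0]
--         matched = [head] if all(head[k] == v for k, v in criteria) else []
--         return matched + keep(rest[1:])
--
--     return keep(notifications)
-- ===== Notes on version B (the rewrite author's own statement) =====
-- stated objective: alternative
-- what changed: Instead of three hard-coded sequential filtering passes, B reifies the active filters as a data-driven criteria list built once and then consumes the notification list by explicit recursion, keeping each element that satisfies every criterion via all().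
import Mathlib
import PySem

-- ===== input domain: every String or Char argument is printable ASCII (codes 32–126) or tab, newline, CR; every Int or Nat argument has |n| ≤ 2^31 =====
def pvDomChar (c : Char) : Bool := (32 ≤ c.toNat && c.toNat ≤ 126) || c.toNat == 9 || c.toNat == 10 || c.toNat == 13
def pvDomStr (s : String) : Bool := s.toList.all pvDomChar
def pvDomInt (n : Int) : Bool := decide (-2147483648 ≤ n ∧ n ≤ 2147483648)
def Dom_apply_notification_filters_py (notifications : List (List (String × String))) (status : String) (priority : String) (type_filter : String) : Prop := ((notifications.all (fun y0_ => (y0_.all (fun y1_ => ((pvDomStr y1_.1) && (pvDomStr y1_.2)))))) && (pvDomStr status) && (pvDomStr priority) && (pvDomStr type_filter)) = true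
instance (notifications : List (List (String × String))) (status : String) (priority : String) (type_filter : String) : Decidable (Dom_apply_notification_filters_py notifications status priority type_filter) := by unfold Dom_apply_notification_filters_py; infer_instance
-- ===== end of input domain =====

-- B replaces A's three hard-coded sequential filtering passes with a data-driven
-- criteria list and an explicit recursion over the notifications; objective:
-- alternative. Return-value equivalence on Pre_ (inputs where A raises KeyError
-- are excluded).

-- Python's n[k] lookup on an assoc-list dict: first matching key, none = KeyError.
def pvLookup (n : List (String × String)) (k : String) : Option String :=
  (n.find? (fun kv => kv.1 == k)).map (·.2)

-- ===== PORT A =====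
def apply_notification_filters_py (notifications : List (List (String × String))) (status : String) (priority : String) (type_filter : String) : List (List (String × String)) :=
  let filtered := notifications
  let filtered := if status != "All" then filtered.filter (fun n => pvLookup n "status" == some status) else filtered
  let filtered := if priority != "All" then filtered.filter (fun n => pvLookup n "priority" == some priority) else filtered
  let filtered := if type_filter != "All" then filtered.filter (fun n => pvLookup n "type" == some type_filter) else filtered
  filtered

-- ===== PORT B =====
-- the criteria list built once from the three (key, value) pairs, keeping active ones
def pvCriteria (status priority type_filter : String) : List (String × String) :=
  ([("status", status), ("priority", priority), ("type", type_filter)]).filter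
    (fun kv => kv.2 != "All")

-- B's recursive 'keep': matched ++ keep (rest[1:])
def pvKeep (criteria : List (String × String)) : List (List (String × String)) → List (List (String × String))
  | [] => []
  | head :: rest =>
      (if criteria.all (fun kv => pvLookup head kv.1 == some kv.2) then [head] else [])
        ++ pvKeep criteria rest

def apply_notification_filters_py_alt (notifications : List (List (String × String))) (status : String) (priority : String) (type_filter : String) : List (List (String × String)) :=
  pvKeep (pvCriteria status priority type_filter) notifications

-- ===== PRECONDITION & SPEC =====
-- Pre_ excludes exactly the inputs on which Python A raises KeyError: for each element,
-- every key demanded by an active filter that the element actually reaches must be present.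
def Pre_apply_notification_filters_py (notifications : List (List (String × String))) (status : String) (priority : String) (type_filter : String) : Prop :=
  ∀ n ∈ notifications,
    (status ≠ "All" → (pvLookup n "status").isSome) ∧
    ((status = "All" ∨ pvLookup n "status" = some status) →
      (priority ≠ "All" → (pvLookup n "priority").isSome) ∧
      ((priority = "All" ∨ pvLookup n "priority" = some priority) →
        (type_filter ≠ "All" → (pvLookup n "type").isSome)))
instance (notifications : List (List (String × String))) (status : String) (priority : String) (type_filter : String) : Decidable (Pre_apply_notification_filters_py notifications status priority type_filter) := by unfold Pre_apply_notification_filters_py; infer_instance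

def pvWitness_apply_notification_filters_py : (List (List (String × String))) × String × String × String :=
  ([[("status", "open"), ("priority", "high"), ("type", "info")],
    [("status", "closed"), ("priority", "low"), ("type", "warn")]], "open", "All", "info")

def Spec_apply_notification_filters_py (notifications : List (List (String × String))) (status : String) (priority : String) (type_filter : String) (out : List (List (String × String))) : Prop := out = apply_notification_filters_py_alt notifications status priority type_filter
instance (notifications : List (List (String × String))) (status : String) (priority : String) (type_filter : String) (out : List (List (String × String))) : Decidable (Spec_apply_notification_filters_py notifications status priority type_filter out) := by unfold Spec_apply_notification_filters_py; infer_instance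

-- ===== CLAIM (what is proved, stated in full; the proofs are below) =====
def Claim_equal_apply_notification_filters_py : Prop := ∀ (notifications : List (List (String × String))) (status : String) (priority : String) (type_filter : String), Dom_apply_notification_filters_py notifications status priority type_filter → Pre_apply_notification_filters_py notifications status priority type_filter → Spec_apply_notification_filters_py notifications status priority type_filter (apply_notification_filters_py notifications status priority type_filter)

-- ===== LEMMAS AND PROOFS =====

-- A's conditional pass: 'if the filter is active, keep the matches' as one filter.
theorem pv_ite_filter {alpha : Type} (c : Bool) (p : alpha -> Bool) (l : List alpha) :
    (if c then l.filter p else l) = l.filter (fun x => !c || p x) := by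
  cases c <;> simp

-- B's recursion is a filter by the conjunction of the criteria.
theorem pvKeep_eq_filter (criteria : List (String × String)) (l : List (List (String × String))) :
    pvKeep criteria l = l.filter (fun n => criteria.all (fun kv => pvLookup n kv.1 == some kv.2)) := by
  induction l with
  | nil => rfl
  | cons h t ih =>
      simp only [pvKeep, ih, List.filter_cons]
      split_ifs <;> simp_all

-- ===== VERDICT (by name: the statement is the Claim_ definition above) =====
theorem apply_notification_filters_py_spec : Claim_equal_apply_notification_filters_py := by
  intro nots s p t _ _
  unfold Spec_apply_notification_filters_py apply_notification_filters_py apply_notification_filters_py_alt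
  simp only [pv_ite_filter, pvKeep_eq_filter]
  simp only [List.filter_filter]
  apply List.filter_congr
  intro n _
  simp only [pvCriteria]
  cases hs : s == "All" <;> cases hp : p == "All" <;> cases ht : t == "All" <;>
    simp [hs, hp, ht, bne, Bool.and_comm, Bool.and_left_comm, Bool.and_assoc]
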